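-- pv_equiv track=rewrite | github.com/kpblcaoo/llmstruct | src/llmstruct/core/hash_utils.py | compare_hash_databases
-- ===== SOURCE A (Python) =====
-- from typing import Optional, Dict, Any
--
-- def compare_hash_databases(old_db: Dict[str, str],
--                           new_db: Dict[str, str]) -> Dict[str, list]:
--     """
--     Compare two hash databases to find changes.
--
--     Args:
--         old_db: Previous hash database
--         new_db: Current hash database
--
--     Returns:
--         Dictionary with 'added', 'modified', 'deleted' file lists
--     """
--     old_files = set(old_db.keys())
--     new_files = set(new_db.keys())
--
--     added = list(new_files - old_files)
--     deleted = list(old_files - new_files)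
--
--     modified = []
--     for file_path in old_files & new_files:
--         if old_db[file_path] != new_db[file_path]:
--             modified.append(file_path)
--
--     return {
--         'added': sorted(added),
--         'modified': sorted(modified),
--         'deleted': sorted(deleted)
--     }
-- ===== SOURCE B (Python) =====
-- def compare_hash_databases(old_db, new_db):
--     old_keys = sorted(old_db)
--     new_keys = sorted(new_db)
--     added, modified, deleted = [], [], []
--     i = j = 0
--     while i < len(old_keys) and j < len(new_keys):
--         a, b = old_keys[i], new_keys[j]
--         if a == b:
--             if old_db[a] != new_db[b]:
--                 modified.append(a)
--             i += 1
--             j += 1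
--         elif a < b:
--             deleted.append(a)
--             i += 1
--         else:
--             added.append(b)
--             j += 1
--     deleted += old_keys[i:]
--     added += new_keys[j:]
--     return {'added': added, 'modified': modified, 'deleted': deleted}
-- ===== Notes on version B (the rewrite author's own statement) =====
-- stated objective: alternative
-- what changed: B sorts the two key lists up front and classifies keys with a single two-pointer merge over the sorted lists, emitting added/modified/deleted already in order, instead of A's set differences, intersection loop and three final sorts.
import Mathlib
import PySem

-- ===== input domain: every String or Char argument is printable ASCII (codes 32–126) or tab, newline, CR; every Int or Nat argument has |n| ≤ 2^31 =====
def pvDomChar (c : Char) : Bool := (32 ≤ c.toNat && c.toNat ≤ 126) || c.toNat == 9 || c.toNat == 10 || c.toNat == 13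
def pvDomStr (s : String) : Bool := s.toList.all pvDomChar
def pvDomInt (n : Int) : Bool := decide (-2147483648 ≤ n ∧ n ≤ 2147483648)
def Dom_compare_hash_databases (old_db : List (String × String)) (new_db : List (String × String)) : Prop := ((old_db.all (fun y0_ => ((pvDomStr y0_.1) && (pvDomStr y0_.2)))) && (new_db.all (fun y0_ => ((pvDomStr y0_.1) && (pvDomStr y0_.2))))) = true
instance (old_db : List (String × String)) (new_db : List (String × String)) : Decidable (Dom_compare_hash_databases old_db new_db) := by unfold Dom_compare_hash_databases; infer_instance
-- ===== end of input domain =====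

-- B replaces A's set differences + intersection loop + three final sorts by sorting the two
-- key lists once and classifying keys with a single two-pointer merge (objective: alternative).

-- ===== PORT A =====
-- A's dict parameters arrive as association lists; Python-dict semantics via PySem.Dict.ofList.
def compare_hash_databases (old_db : List (String × String)) (new_db : List (String × String)) : List (String × List String) :=
  let od := PySem.Dict.ofList old_db
  let nd := PySem.Dict.ofList new_db
  let old_files : PySem.Set String := PySem.Set.ofList od.keys
  let new_files : PySem.Set String := PySem.Set.ofList nd.keys
  let added : List String := PySem.Set.diff new_files old_files
  let deleted : List String := PySem.Set.diff old_files new_files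
  let modified : List String :=
    (PySem.Set.inter old_files new_files).foldl
      (fun acc f => if od.get? f ≠ nd.get? f then acc ++ [f] else acc) []
  [("added", PySem.List.sorted added (fun x => x) false),
   ("modified", PySem.List.sorted modified (fun x => x) false),
   ("deleted", PySem.List.sorted deleted (fun x => x) false)]

-- ===== PORT B =====
-- B's while loop over the two sorted key lists, as structural recursion on the index
-- suffixes with the three accumulator lists; keys are in their dicts, so the Python
-- lookups old_db[a] / new_db[b] are the (some) values od.get? a / nd.get? b.
def pvMergeLoop (od nd : PySem.Dict String String) :
    List String → List String → List String → List String → List String →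
    List String × List String × List String
  | a :: xs, b :: ys, added, modified, deleted =>
    if a = b then
      if od.get? a ≠ nd.get? b then
        pvMergeLoop od nd xs ys added (modified ++ [a]) deleted
      else
        pvMergeLoop od nd xs ys added modified deleted
    else if a < b then
      pvMergeLoop od nd xs (b :: ys) added modified (deleted ++ [a])
    else
      pvMergeLoop od nd (a :: xs) ys (added ++ [b]) modified deleted
  | xs, ys, added, modified, deleted => (added ++ ys, modified, deleted ++ xs)
termination_by xs ys _ _ _ => xs.length + ys.length
decreasing_by all_goals simp only [List.length_cons]; omega

def compare_hash_databases_alt (old_db : List (String × String)) (new_db : List (String × String)) : List (String × List String) :=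
  let od := PySem.Dict.ofList old_db
  let nd := PySem.Dict.ofList new_db
  let old_keys := PySem.List.sorted od.keys (fun x => x) false
  let new_keys := PySem.List.sorted nd.keys (fun x => x) false
  let r := pvMergeLoop od nd old_keys new_keys [] [] []
  [("added", r.1), ("modified", r.2.1), ("deleted", r.2.2)]

-- ===== PRECONDITION & SPEC =====
def Spec_compare_hash_databases (old_db : List (String × String)) (new_db : List (String × String)) (out : List (String × List String)) : Prop := out = compare_hash_databases_alt old_db new_db
instance (old_db : List (String × String)) (new_db : List (String × String)) (out : List (String × List String)) : Decidable (Spec_compare_hash_databases old_db new_db out) := by unfold Spec_compare_hash_databases; infer_instance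

-- ===== CLAIM (what is proved, stated in full; the proofs are below) =====
def Claim_equal_compare_hash_databases : Prop := ∀ (old_db : List (String × String)) (new_db : List (String × String)), Dom_compare_hash_databases old_db new_db → Spec_compare_hash_databases old_db new_db (compare_hash_databases old_db new_db)

-- ===== LEMMAS AND PROOFS =====

-- Set.diff / Set.inter on lists are filters (definitional).
theorem pvDiffFilter (a b : List String) :
    PySem.Set.diff a b = a.filter (fun x => !(PySem.Set.contains b x)) := rfl

theorem pvInterFilter (a b : List String) (q : String → Bool) :
    (PySem.Set.inter a b).filter q = a.filter (fun x => PySem.Set.contains b x && q x) := by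
  show (a.filter _).filter q = _
  rw [List.filter_filter]
  exact List.filter_congr fun k _ => Bool.and_comm _ _

-- sorted(base.filter p) equals a strictly increasing rearrangement filtered by the same predicate.
theorem pvSortedFilter (base bs : List String) (p q : String → Bool)
    (hperm : bs.Perm base) (hlt : bs.Pairwise (· < ·)) (hpq : ∀ k, p k = q k) :
    PySem.List.sorted (base.filter p) (fun x => x) false = bs.filter q := by
  apply PySem.List.sorted_eq_of_perm_of_pairwise_lt
  · rw [List.filter_congr (fun k _ => (hpq k).symm)]
    exact hperm.filter p
  · exact hlt.filter q

-- The merge loop over strictly increasing key lists computes three filters.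
theorem pvMergeLoop_spec (od nd : PySem.Dict String String)
    (xs ys a m d : List String) :
    xs.Pairwise (· < ·) → ys.Pairwise (· < ·) →
    pvMergeLoop od nd xs ys a m d =
      (a ++ ys.filter (fun k => !xs.contains k),
       m ++ xs.filter (fun k => ys.contains k && decide (od.get? k ≠ nd.get? k)),
       d ++ xs.filter (fun k => !ys.contains k)) := by
  fun_induction pvMergeLoop od nd xs ys a m d with
  | case1 xs' x ys' a m d hne ih =>
    intro hx hy
    have hxs : ∀ k ∈ xs', x < k := fun k hk => (List.pairwise_cons.mp hx).1 k hk
    have hys : ∀ k ∈ ys', x < k := fun k hk => (List.pairwise_cons.mp hy).1 k hk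
    have e1 : ∀ k ∈ ys', ((x :: xs').contains k) = (xs'.contains k) := fun k hk => by
      simp [(ne_of_lt (hys k hk)).symm]
    have e2 : ∀ k ∈ xs', ((x :: ys').contains k) = (ys'.contains k) := fun k hk => by
      simp [(ne_of_lt (hxs k hk)).symm]
    rw [ih hx.tail hy.tail,
      List.filter_cons_of_neg (p := fun k => !(x :: xs').contains k) (by simp),
      List.filter_cons_of_pos
        (p := fun k => (x :: ys').contains k && decide (od.get? k ≠ nd.get? k))
        (by simp [hne]),
      List.filter_cons_of_neg (p := fun k => !(x :: ys').contains k) (by simp),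
      List.filter_congr (p := fun k => !(x :: xs').contains k)
        (q := fun k => !xs'.contains k) (fun k hk => by simp only [e1 k hk]),
      List.filter_congr (p := fun k => (x :: ys').contains k && decide (od.get? k ≠ nd.get? k))
        (q := fun k => ys'.contains k && decide (od.get? k ≠ nd.get? k)) (fun k hk => by simp only [e2 k hk]),
      List.filter_congr (p := fun k => !(x :: ys').contains k)
        (q := fun k => !ys'.contains k) (fun k hk => by simp only [e2 k hk])]
    simp
  | case2 xs' x ys' a m d hne ih =>
    intro hx hy
    have hxs : ∀ k ∈ xs', x < k := fun k hk => (List.pairwise_cons.mp hx).1 k hk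
    have hys : ∀ k ∈ ys', x < k := fun k hk => (List.pairwise_cons.mp hy).1 k hk
    have e1 : ∀ k ∈ ys', ((x :: xs').contains k) = (xs'.contains k) := fun k hk => by
      simp [(ne_of_lt (hys k hk)).symm]
    have e2 : ∀ k ∈ xs', ((x :: ys').contains k) = (ys'.contains k) := fun k hk => by
      simp [(ne_of_lt (hxs k hk)).symm]
    rw [ih hx.tail hy.tail,
      List.filter_cons_of_neg (p := fun k => !(x :: xs').contains k) (by simp),
      List.filter_cons_of_neg
        (p := fun k => (x :: ys').contains k && decide (od.get? k ≠ nd.get? k))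
        (by simp [not_not.mp hne]),
      List.filter_cons_of_neg (p := fun k => !(x :: ys').contains k) (by simp),
      List.filter_congr (p := fun k => !(x :: xs').contains k)
        (q := fun k => !xs'.contains k) (fun k hk => by simp only [e1 k hk]),
      List.filter_congr (p := fun k => (x :: ys').contains k && decide (od.get? k ≠ nd.get? k))
        (q := fun k => ys'.contains k && decide (od.get? k ≠ nd.get? k)) (fun k hk => by simp only [e2 k hk]),
      List.filter_congr (p := fun k => !(x :: ys').contains k)
        (q := fun k => !ys'.contains k) (fun k hk => by simp only [e2 k hk])]
  | case3 x xs' y ys' a m d hne hlt ih =>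
    intro hx hy
    have hxs : ∀ k ∈ xs', x < k := fun k hk => (List.pairwise_cons.mp hx).1 k hk
    have hys : ∀ k ∈ ys', y < k := fun k hk => (List.pairwise_cons.mp hy).1 k hk
    have hxk : ∀ k ∈ y :: ys', x < k := by
      intro k hk
      rcases List.mem_cons.mp hk with rfl | hk
      · exact hlt
      · exact lt_trans hlt (hys k hk)
    have e1 : ∀ k ∈ y :: ys', ((x :: xs').contains k) = (xs'.contains k) := fun k hk => by
      simp [(ne_of_lt (hxk k hk)).symm]
    have hx_not_mem : x ∉ y :: ys' := fun hm => absurd (hxk x hm) (lt_irrefl x)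
    rw [ih hx.tail hy,
      List.filter_cons_of_neg
        (p := fun k => (y :: ys').contains k && decide (od.get? k ≠ nd.get? k))
        (by simp [hx_not_mem]),
      List.filter_cons_of_pos (p := fun k => !(y :: ys').contains k)
        (by simp [hx_not_mem]),
      List.filter_congr (p := fun k => !(x :: xs').contains k)
        (q := fun k => !xs'.contains k) (fun k hk => by simp only [e1 k hk])]
    simp
  | case4 x xs' y ys' a m d hne hnlt ih =>
    intro hx hy
    have hgt : y < x := lt_of_le_of_ne (not_lt.mp hnlt) (fun h => hne h.symm)
    have hxs : ∀ k ∈ xs', x < k := fun k hk => (List.pairwise_cons.mp hx).1 k hk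
    have hyk : ∀ k ∈ x :: xs', y < k := by
      intro k hk
      rcases List.mem_cons.mp hk with rfl | hk
      · exact hgt
      · exact lt_trans hgt (hxs k hk)
    have e2 : ∀ k ∈ x :: xs', ((y :: ys').contains k) = (ys'.contains k) := fun k hk => by
      simp [(ne_of_lt (hyk k hk)).symm]
    have hy_not_mem : y ∉ x :: xs' := fun hm => absurd (hyk y hm) (lt_irrefl y)
    rw [ih hx hy.tail,
      List.filter_cons_of_pos (p := fun k => !(x :: xs').contains k)
        (by simp [hy_not_mem]),
      List.filter_congr (p := fun k => (y :: ys').contains k && decide (od.get? k ≠ nd.get? k))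
        (q := fun k => ys'.contains k && decide (od.get? k ≠ nd.get? k)) (fun k hk => by simp only [e2 k hk]),
      List.filter_congr (p := fun k => !(y :: ys').contains k)
        (q := fun k => !ys'.contains k) (fun k hk => by simp only [e2 k hk])]
    simp
  | case5 xs ys a m d h =>
    intro _ _
    rcases xs with _ | ⟨x, xs⟩ <;> rcases ys with _ | ⟨y, ys⟩
    · simp
    · simp
    · simp
    · exact (h x xs y ys rfl rfl).elim

theorem compare_hash_databases_spec : Claim_equal_compare_hash_databases := by
  intro old_db new_db _
  unfold Spec_compare_hash_databases compare_hash_databases compare_hash_databases_alt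
  dsimp only
  set od := PySem.Dict.ofList old_db with hod
  set nd := PySem.Dict.ofList new_db with hnd
  have hodn : od.keys.Nodup := PySem.Dict.nodup_keys_ofList old_db
  have hndn : nd.keys.Nodup := PySem.Dict.nodup_keys_ofList new_db
  have hO : PySem.Set.ofList od.keys = od.keys := PySem.Set.ofList_eq_self_of_nodup _ hodn
  have hN : PySem.Set.ofList nd.keys = nd.keys := PySem.Set.ofList_eq_self_of_nodup _ hndn
  set os := PySem.List.sorted od.keys (fun x => x) false with hos
  set ns := PySem.List.sorted nd.keys (fun x => x) false with hns
  have hosp : os.Perm od.keys := PySem.List.sorted_perm _ _ _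
  have hnsp : ns.Perm nd.keys := PySem.List.sorted_perm _ _ _
  have hosn : os.Nodup := hosp.nodup_iff.mpr hodn
  have hnsn : ns.Nodup := hnsp.nodup_iff.mpr hndn
  have hosle : os.Pairwise (fun a b => a ≤ b) := PySem.List.sorted_pairwise od.keys (fun x => x)
  have hnsle : ns.Pairwise (fun a b => a ≤ b) := PySem.List.sorted_pairwise nd.keys (fun x => x)
  have hoslt : os.Pairwise (· < ·) :=
    (hosle.and hosn).imp (fun h => lt_of_le_of_ne h.1 h.2)
  have hnslt : ns.Pairwise (· < ·) :=
    (hnsle.and hnsn).imp (fun h => lt_of_le_of_ne h.1 h.2)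
  rw [pvMergeLoop_spec od nd os ns [] [] [] hoslt hnslt]
  simp only [hO, hN, List.nil_append]
  rw [pvDiffFilter, pvDiffFilter, PySem.List.foldl_append_ite_eq_filter, List.nil_append,
    pvInterFilter]
  rw [pvSortedFilter nd.keys ns
      (fun x => !(PySem.Set.contains od.keys x)) (fun k => !os.contains k) hnsp hnslt
      (fun k => by simp [PySem.Set.contains_eq_listContains, hosp.mem_iff]),
    pvSortedFilter od.keys os
      (fun x => PySem.Set.contains nd.keys x && decide (od.get? x ≠ nd.get? x))
      (fun k => ns.contains k && decide (od.get? k ≠ nd.get? k)) hosp hoslt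
      (fun k => by simp [PySem.Set.contains_eq_listContains, hnsp.mem_iff]),
    pvSortedFilter od.keys os
      (fun x => !(PySem.Set.contains nd.keys x)) (fun k => !ns.contains k) hosp hoslt
      (fun k => by simp [PySem.Set.contains_eq_listContains, hnsp.mem_iff])]
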